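-- pv_equiv track=rewrite | github.com/PimonovDaniil/io5 | smeshStrategMath.py | sokrStrockVertikal
-- ===== SOURCE A (Python) =====
-- def sravnMassVertikal(m, i1, i2):
--     flag = True
--     for i in range(len(m)):
--         if m[i][i1] > m[i][i2]:
--             flag = False
--             break
--     return flag
--
-- def sokrStrockVertikal(m):
--     flag = True
--     while flag:
--         flag = False
--         for i in range(len(m[0])):
--             if not flag:
--                 for j in range(len(m[0])):
--                     if i != j and sravnMassVertikal(m, i, j):
--                         flag = True
--                         for i2 in range(len(m)):
--                             del m[i2][j]
--                         break
--     return m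
-- ===== SOURCE B (Python) =====
-- # B: compute the column-domination table once, pick surviving columns in one pass,
-- # then rewrite each row in place (same in-place mutation of the rows as A;
-- # entries beyond the first row's width are never compared and are kept, as A's del does).
-- def sokrStrockVertikal(m):
--     n = len(m[0])
--     def le(a, b):
--         return all(not (row[a] > row[b]) for row in m)
--     keep = [j for j in range(n)
--             if not any(i != j and le(i, j) and not le(j, i) for i in range(n))
--             and not any(le(i, j) and le(j, i) for i in range(j))]
--     for row in m:
--         row[:] = [row[j] for j in keep] + row[n:]
--     return m
-- ===== Notes on version B (the rewrite author's own statement) =====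
-- stated objective: alternative
-- what changed: A repeatedly rescans all column pairs from scratch and deletes one dominated column per pass until a fixpoint; B computes the elementwise column-domination relation, selects the surviving columns (not strictly dominated, no earlier equal column) in one pass over the pairs, and rewrites each row in place once.
-- outside the precondition, e.g. on sokrStrockVertikal([]): A raises IndexError, B raises IndexError; on sokrStrockVertikal([[1, 2], [3]]): A raises IndexError, B raises IndexError; on sokrStrockVertikal([[5], []]): A returns [[5], []], B raises IndexError
import Mathlib
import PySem

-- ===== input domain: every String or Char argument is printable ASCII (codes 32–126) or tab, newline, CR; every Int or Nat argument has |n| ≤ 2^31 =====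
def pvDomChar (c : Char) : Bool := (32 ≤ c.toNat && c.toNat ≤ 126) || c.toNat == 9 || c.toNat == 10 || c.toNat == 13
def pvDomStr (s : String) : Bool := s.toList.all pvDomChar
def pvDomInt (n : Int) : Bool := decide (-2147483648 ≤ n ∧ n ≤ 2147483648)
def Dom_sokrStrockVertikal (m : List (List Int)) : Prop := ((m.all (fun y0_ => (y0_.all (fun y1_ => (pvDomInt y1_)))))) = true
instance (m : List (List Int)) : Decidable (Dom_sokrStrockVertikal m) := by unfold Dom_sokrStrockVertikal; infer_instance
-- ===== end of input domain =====

-- B replaces A's restart-the-scan-after-every-deletion loop by computing the column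
-- domination relation once and selecting the surviving columns in a single pass
-- (agreement is about the returned matrix; both A and Source B also mutate the rows in place).

-- ===== PORT A =====
-- Python sravnMassVertikal: loop over rows with break-on-first-violation = structural recursion.
def sravnMassVertikal (m : List (List Int)) (i1 i2 : Nat) : Bool :=
  match m with
  | [] => true
  | r :: rest => if r.getD i1 0 > r.getD i2 0 then false else sravnMassVertikal rest i1 i2

-- A's inner `for j in range(n): if i != j and sravn...: ...; break` = first matching j.
def findJA (m : List (List Int)) (i : Nat) : List Nat → Option Nat
  | [] => none
  | j :: js => if i ≠ j ∧ sravnMassVertikal m i j = true then some j else findJA m i js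

-- A's outer `for i in range(n): if not flag: ...` = first i whose inner scan fires
-- (after the first hit, `flag` makes all remaining iterations of the pass no-ops).
def findPairA (m : List (List Int)) (n : Nat) : List Nat → Option Nat
  | [] => none
  | i :: is => match findJA m i (List.range n) with
    | some j => some j
    | none => findPairA m n is

-- needed by the port's termination proof
theorem findJA_mem {m : List (List Int)} {i : Nat} {l : List Nat} {j : Nat}
    (h : findJA m i l = some j) : j ∈ l := by
  induction l with
  | nil => simp [findJA] at h
  | cons a as ih =>
    simp only [findJA] at h
    split at h
    · cases h; exact List.mem_cons_self
    · exact List.mem_cons_of_mem _ (ih h)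

theorem findPairA_mem {m : List (List Int)} {n : Nat} {is : List Nat} {j : Nat}
    (h : findPairA m n is = some j) : j < n := by
  induction is with
  | nil => simp [findPairA] at h
  | cons a as ih =>
    simp only [findPairA] at h
    split at h
    · next heq => cases h; exact List.mem_range.mp (findJA_mem heq)
    · exact ih h

-- A's `while flag` loop: each pass deletes column j of the first pair (i, j) with
-- column i ≤ column j (elementwise), then rescans from scratch.
def sokrStrockVertikal (m : List (List Int)) : List (List Int) :=
  match h : findPairA m (m.headD []).length (List.range (m.headD []).length) with
  | none => m
  | some j => sokrStrockVertikal (m.map (fun r => r.eraseIdx j))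
termination_by (m.headD []).length
decreasing_by
  have hj : j < (m.headD []).length := findPairA_mem h
  cases m with
  | nil => simp at hj
  | cons r rest =>
    simp at hj ⊢
    rw [List.length_eraseIdx]
    split_ifs <;> omega

-- ===== PORT B =====
-- Source B's le(a, b): all(not (row[a] > row[b]) for row in m)
def leB (m : List (List Int)) (a b : Nat) : Bool :=
  m.all (fun row => !decide (row.getD a 0 > row.getD b 0))

-- Source B's keep-predicate for column j: not strictly dominated, no earlier equal column.
def keepB (m : List (List Int)) (n j : Nat) : Bool :=
  !((List.range n).any (fun i => i != j && leB m i j && !leB m j i)) &&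
  !((List.range j).any (fun i => leB m i j && leB m j i))

def sokrStrockVertikal_alt (m : List (List Int)) : List (List Int) :=
  m.map (fun row =>
    ((List.range (m.headD []).length).filter (keepB m (m.headD []).length)).map
      (fun j => row.getD j 0) ++ row.drop (m.headD []).length)

-- ===== PRECONDITION & SPEC =====
-- Pre_ excludes the empty matrix, on which A raises IndexError at m[0], and matrices
-- with a row shorter than the first row, on which A's column comparisons in general
-- raise IndexError (in the degenerate widths where an empty scan lets A return the
-- input unchanged, B raises IndexError instead).
def Pre_sokrStrockVertikal (m : List (List Int)) : Prop :=
  m ≠ [] ∧ ∀ r ∈ m, (m.headD []).length ≤ r.length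

instance (m : List (List Int)) : Decidable (Pre_sokrStrockVertikal m) := by
  unfold Pre_sokrStrockVertikal; infer_instance

def pvWitness_sokrStrockVertikal : List (List Int) := [[1, 2], [0, 5]]

def Spec_sokrStrockVertikal (m : List (List Int)) (out : List (List Int)) : Prop := out = sokrStrockVertikal_alt m
instance (m : List (List Int)) (out : List (List Int)) : Decidable (Spec_sokrStrockVertikal m out) := by unfold Spec_sokrStrockVertikal; infer_instance

-- ===== CLAIM (what is proved, stated in full; the proofs are below) =====
def Claim_equal_sokrStrockVertikal : Prop := ∀ (m : List (List Int)), Dom_sokrStrockVertikal m → Pre_sokrStrockVertikal m → Spec_sokrStrockVertikal m (sokrStrockVertikal m)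

-- ===== LEMMAS AND PROOFS =====

-- column a is elementwise ≤ column b
def LEp (m : List (List Int)) (a b : Nat) : Prop := ∀ r ∈ m, r.getD a 0 ≤ r.getD b 0

theorem LEp_trans {m : List (List Int)} {a b c : Nat} (h1 : LEp m a b) (h2 : LEp m b c) :
    LEp m a c := fun r hr => le_trans (h1 r hr) (h2 r hr)

-- column j survives: no strict dominator, no earlier equal column
def Keepp (m : List (List Int)) (n j : Nat) : Prop :=
  (¬ ∃ i, i < n ∧ i ≠ j ∧ LEp m i j ∧ ¬ LEp m j i) ∧
  (¬ ∃ i, i < j ∧ LEp m i j ∧ LEp m j i)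

-- column j is deletable, with the first-pair minimality already folded in
def Bad (m : List (List Int)) (n j : Nat) : Prop :=
  ∃ i, i < n ∧ i ≠ j ∧ LEp m i j ∧ (¬ LEp m j i ∨ (LEp m j i ∧ i < j))

def uIdx (j k : Nat) : Nat := if k < j then k else k + 1

theorem sravn_iff (m : List (List Int)) (a b : Nat) :
    sravnMassVertikal m a b = true ↔ LEp m a b := by
  induction m with
  | nil => simp [sravnMassVertikal, LEp]
  | cons r rest ih =>
    simp only [sravnMassVertikal]
    split
    · next h =>
      simp only [Bool.false_eq_true, false_iff]
      intro hc; exact absurd (hc r (by simp)) (not_le.mpr h)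
    · next h =>
      rw [ih]
      unfold LEp
      simp only [List.mem_cons]
      constructor
      · rintro hrest r' (rfl | hr')
        · exact not_lt.mp h
        · exact hrest r' hr'
      · intro hall r' hr'; exact hall r' (Or.inr hr')

theorem leB_iff (m : List (List Int)) (a b : Nat) : leB m a b = true ↔ LEp m a b := by
  simp [leB, LEp, List.all_eq_true, not_lt]

theorem anyStrict_iff (m : List (List Int)) (n j : Nat) :
    ((List.range n).any (fun i => i != j && leB m i j && !leB m j i)) = true ↔
      ∃ i, i < n ∧ i ≠ j ∧ LEp m i j ∧ ¬ LEp m j i := by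
  rw [List.any_eq_true]
  constructor
  · rintro ⟨i, hi, hb⟩
    simp only [Bool.and_eq_true, bne_iff_ne, Bool.not_eq_true'] at hb
    refine ⟨i, List.mem_range.mp hi, hb.1.1, (leB_iff m i j).mp hb.1.2, ?_⟩
    intro c
    exact absurd ((leB_iff m j i).mpr c) (by simp [hb.2])
  · rintro ⟨i, hin, hij, hle, hnle⟩
    refine ⟨i, List.mem_range.mpr hin, ?_⟩
    simp only [Bool.and_eq_true, bne_iff_ne, Bool.not_eq_true']
    exact ⟨⟨hij, (leB_iff m i j).mpr hle⟩,
      Bool.eq_false_iff.mpr (fun c => hnle ((leB_iff m j i).mp c))⟩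

theorem anyEq_iff (m : List (List Int)) (j : Nat) :
    ((List.range j).any (fun i => leB m i j && leB m j i)) = true ↔
      ∃ i, i < j ∧ LEp m i j ∧ LEp m j i := by
  rw [List.any_eq_true]
  constructor
  · rintro ⟨i, hi, hb⟩
    simp only [Bool.and_eq_true] at hb
    exact ⟨i, List.mem_range.mp hi, (leB_iff m i j).mp hb.1, (leB_iff m j i).mp hb.2⟩
  · rintro ⟨i, hij, hle, he⟩
    refine ⟨i, List.mem_range.mpr hij, ?_⟩
    simp only [Bool.and_eq_true]
    exact ⟨(leB_iff m i j).mpr hle, (leB_iff m j i).mpr he⟩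

theorem keepB_iff (m : List (List Int)) (n j : Nat) : keepB m n j = true ↔ Keepp m n j := by
  unfold keepB Keepp
  rw [Bool.and_eq_true, Bool.not_eq_true', Bool.not_eq_true', Bool.eq_false_iff,
    Bool.eq_false_iff, Ne, Ne, anyStrict_iff, anyEq_iff]

theorem Bad_not_keep {m : List (List Int)} {n j : Nat} (h : Bad m n j) : ¬ Keepp m n j := by
  rcases h with ⟨i, hin, hij, hle, hs | ⟨he, hlt⟩⟩
  · intro hk; exact hk.1 ⟨i, hin, hij, hle, hs⟩
  · intro hk; exact hk.2 ⟨i, hlt, hle, he⟩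

theorem not_keep_bad {m : List (List Int)} {n j : Nat} (hj : j < n) (h : ¬ Keepp m n j) :
    Bad m n j := by
  unfold Keepp at h
  rcases not_and_or.mp h with h1 | h2
  · rcases not_not.mp h1 with ⟨i, hin, hij, hle, hnle⟩
    exact ⟨i, hin, hij, hle, Or.inl hnle⟩
  · rcases not_not.mp h2 with ⟨i, hij, hle, he⟩
    exact ⟨i, by omega, by omega, hle, Or.inr ⟨he, hij⟩⟩

theorem findJA_none {m : List (List Int)} {i : Nat} {l : List Nat}
    (h : findJA m i l = none) : ∀ j ∈ l, i ≠ j → ¬ LEp m i j := by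
  induction l with
  | nil => simp
  | cons a as ih =>
    simp only [findJA] at h
    split at h
    · exact absurd h (by simp)
    · next hc =>
      intro j hj hij
      rcases List.mem_cons.mp hj with rfl | hj'
      · intro hle; exact hc ⟨hij, (sravn_iff m i j).mpr hle⟩
      · exact ih h j hj' hij

theorem findJA_some {m : List (List Int)} {i : Nat} {l : List Nat} {j : Nat}
    (h : findJA m i l = some j) : i ≠ j ∧ LEp m i j := by
  induction l with
  | nil => simp [findJA] at h
  | cons a as ih =>
    simp only [findJA] at h
    split at h
    · next hc => cases h; exact ⟨hc.1, (sravn_iff m i j).mp hc.2⟩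
    · exact ih h

theorem findPairA_none {m : List (List Int)} {n : Nat} {is : List Nat}
    (h : findPairA m n is = none) : ∀ i ∈ is, findJA m i (List.range n) = none := by
  induction is with
  | nil => simp
  | cons a as ih =>
    simp only [findPairA] at h
    split at h
    · exact absurd h (by simp)
    · next heq =>
      intro i hi
      rcases List.mem_cons.mp hi with rfl | hi'
      · exact heq
      · exact ih h i hi'

theorem findPairA_spec {m : List (List Int)} {n : Nat} :
    ∀ (is : List Nat) (j : Nat), findPairA m n is = some j →
      ∃ l1 i l2, is = l1 ++ i :: l2 ∧ (∀ i' ∈ l1, findJA m i' (List.range n) = none) ∧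
        findJA m i (List.range n) = some j := by
  intro is
  induction is with
  | nil => intro j h; simp [findPairA] at h
  | cons a as ih =>
    intro j h
    simp only [findPairA] at h
    split at h
    · next heq => cases h; exact ⟨[], a, as, rfl, by simp, heq⟩
    · next heq =>
      obtain ⟨l1, i, l2, rfl, hnone, hsome⟩ := ih j h
      refine ⟨a :: l1, i, l2, rfl, ?_, hsome⟩
      intro i' hi'
      rcases List.mem_cons.mp hi' with rfl | hi''
      · exact heq
      · exact hnone i' hi''

theorem range_eq_append {n : Nat} {l1 : List Nat} {i : Nat} {l2 : List Nat}
    (h : List.range n = l1 ++ i :: l2) : l1 = List.range i := by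
  have hlen : n = l1.length + (l2.length + 1) := by
    have := congrArg List.length h; simpa using this
  have h1 : l1 = List.range l1.length := by
    have ht : List.take l1.length (List.range n) = l1 := by rw [h]; exact List.take_left
    rw [List.take_range, Nat.min_eq_left (by omega)] at ht
    exact ht.symm
  have hi : i = l1.length := by
    have e1 : (List.range n)[l1.length]? = some i := by
      rw [h, List.getElem?_append_right (le_refl _)]
      simp
    have e2 : (List.range n)[l1.length]? = some l1.length := List.getElem?_range (by omega)
    rw [e1] at e2
    exact Option.some_inj.mp e2
  rw [hi]
  exact h1

theorem findPair_bad {m : List (List Int)} {n j : Nat}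
    (h : findPairA m n (List.range n) = some j) : j < n ∧ Bad m n j := by
  have hj : j < n := findPairA_mem h
  obtain ⟨l1, i, l2, hsplit, hnone, hsome⟩ := findPairA_spec _ _ h
  have hl1 : l1 = List.range i := range_eq_append hsplit
  have hi : i < n := by
    have : i ∈ List.range n := by rw [hsplit]; simp
    exact List.mem_range.mp this
  obtain ⟨hij, hle⟩ := findJA_some hsome
  refine ⟨hj, i, hi, hij, hle, ?_⟩
  by_cases hji : LEp m j i
  · right
    refine ⟨hji, ?_⟩
    rcases Nat.lt_trichotomy i j with h' | h' | h'
    · exact h'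
    · exact absurd h' hij
    · exfalso
      have hjl1 : j ∈ l1 := by rw [hl1]; exact List.mem_range.mpr h'
      have := findJA_none (hnone j hjl1) i (List.mem_range.mpr hi) (Ne.symm hij)
      exact this hji
  · left; exact hji

theorem getD_eraseIdx (r : List Int) (j k : Nat) :
    (r.eraseIdx j).getD k 0 = r.getD (uIdx j k) 0 := by
  unfold uIdx
  split
  · next h => simp [List.getD_eq_getElem?_getD, List.getElem?_eraseIdx, h]
  · next h => simp [List.getD_eq_getElem?_getD, List.getElem?_eraseIdx, h]

theorem LEp_map_eraseIdx (m : List (List Int)) (j a b : Nat) :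
    LEp (m.map (fun r => r.eraseIdx j)) a b ↔ LEp m (uIdx j a) (uIdx j b) := by
  unfold LEp
  rw [List.forall_mem_map]
  constructor
  · intro h r hr
    rw [← getD_eraseIdx, ← getD_eraseIdx]
    exact h r hr
  · intro h r hr
    rw [getD_eraseIdx, getD_eraseIdx]
    exact h r hr

theorem uIdx_lt {j k n : Nat} (h : k < n - 1) (hj : j < n) : uIdx j k < n := by
  unfold uIdx; split <;> omega

theorem uIdx_ne {j k : Nat} : uIdx j k ≠ j := by
  unfold uIdx; split <;> omega

theorem uIdx_inj {j k1 k2 : Nat} (h : uIdx j k1 = uIdx j k2) : k1 = k2 := by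
  unfold uIdx at h; split_ifs at h <;> omega

theorem uIdx_lt_iff {j k1 k2 : Nat} : uIdx j k1 < uIdx j k2 ↔ k1 < k2 := by
  unfold uIdx; split_ifs <;> omega

theorem uIdx_surj {j i n : Nat} (hi : i < n) (hij : i ≠ j) (hj : j < n) :
    ∃ k, k < n - 1 ∧ uIdx j k = i := by
  refine ⟨if i < j then i else i - 1, ?_, ?_⟩
  · split_ifs <;> omega
  · unfold uIdx; split_ifs <;> omega

theorem bad_avoid {m : List (List Int)} {n j t : Nat} (hBj : Bad m n j)
    (htj : t ≠ j) (hBt : Bad m n t) :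
    ∃ i, i < n ∧ i ≠ t ∧ i ≠ j ∧ LEp m i t ∧ (¬ LEp m t i ∨ (LEp m t i ∧ i < t)) := by
  obtain ⟨i, hin, hit, hle, hcase⟩ := hBt
  by_cases hij : i = j
  · subst hij
    obtain ⟨a, han, haj, haleJ, hacase⟩ := hBj
    have hat : LEp m a t := LEp_trans haleJ hle
    rcases hacase with hstrict | ⟨haeq, haltj⟩
    · refine ⟨a, han, ?_, haj, hat, Or.inl ?_⟩
      · rintro rfl; exact hstrict hle
      · intro hta; exact hstrict (LEp_trans hle hta)
    · rcases hcase with htstrict | ⟨hteq, hjlt⟩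
      · refine ⟨a, han, ?_, haj, hat, Or.inl ?_⟩
        · rintro rfl; exact htstrict haleJ
        · intro hta; exact htstrict (LEp_trans hta haleJ)
      · exact ⟨a, han, by omega, haj, hat, Or.inr ⟨LEp_trans hteq haeq, by omega⟩⟩
  · exact ⟨i, hin, hit, hij, hle, hcase⟩

theorem keep_transfer {m : List (List Int)} {n j : Nat} (hj : j < n) (hB : Bad m n j)
    (k : Nat) (hk : k < n - 1) :
    Keepp (m.map (fun r => r.eraseIdx j)) (n - 1) k ↔ Keepp m n (uIdx j k) := by
  constructor
  · intro hK'
    by_contra hnk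
    have hBt : Bad m n (uIdx j k) := not_keep_bad (uIdx_lt hk hj) hnk
    obtain ⟨i, hin, hit, hinej, hle, hcase⟩ := bad_avoid hB uIdx_ne hBt
    obtain ⟨k'', hk'', hk''eq⟩ := uIdx_surj hin hinej hj
    subst hk''eq
    rcases hcase with hstrict | ⟨he, hlt⟩
    · exact hK'.1 ⟨k'', hk'', fun e => hit (by rw [e]),
        (LEp_map_eraseIdx m j k'' k).mpr hle,
        fun c => hstrict ((LEp_map_eraseIdx m j k k'').mp c)⟩
    · exact hK'.2 ⟨k'', uIdx_lt_iff.mp hlt,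
        (LEp_map_eraseIdx m j k'' k).mpr hle,
        (LEp_map_eraseIdx m j k k'').mpr he⟩
  · intro hK
    constructor
    · rintro ⟨i', hi', hne, hle, hnle⟩
      exact hK.1 ⟨uIdx j i', uIdx_lt hi' hj, fun e => hne (uIdx_inj e),
        (LEp_map_eraseIdx m j i' k).mp hle,
        fun c => hnle ((LEp_map_eraseIdx m j k i').mpr c)⟩
    · rintro ⟨i', hi'k, hle, he⟩
      exact hK.2 ⟨uIdx j i', uIdx_lt_iff.mpr hi'k,
        (LEp_map_eraseIdx m j i' k).mp hle,
        (LEp_map_eraseIdx m j k i').mp he⟩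

theorem keep_map_u {m : List (List Int)} {n j : Nat} (hj : j < n) (hB : Bad m n j) :
    ((List.range (n - 1)).filter (keepB (m.map (fun r => r.eraseIdx j)) (n - 1))).map (uIdx j)
      = (List.range n).filter (keepB m n) := by
  have h1 : (List.range (n - 1)).filter (keepB (m.map (fun r => r.eraseIdx j)) (n - 1))
      = (List.range (n - 1)).filter (fun k => keepB m n (uIdx j k)) := by
    apply List.filter_congr
    intro k hk
    rw [Bool.eq_iff_iff, keepB_iff, keepB_iff]
    exact keep_transfer hj hB k (List.mem_range.mp hk)
  rw [h1]
  rw [show (fun k => keepB m n (uIdx j k)) = (keepB m n ∘ uIdx j) from rfl]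
  rw [← List.filter_map]
  obtain ⟨d, hd⟩ : ∃ d, d = n - 1 - j := ⟨_, rfl⟩
  have hmap : List.map (uIdx j) (List.range (n - 1))
      = List.range j ++ List.map (fun t => j + 1 + t) (List.range d) := by
    have e1 : n - 1 = j + d := by omega
    rw [e1, List.range_add, List.map_append, List.map_map]
    congr 1
    · have : ∀ k ∈ List.range j, uIdx j k = k := by
        intro k hk
        have := List.mem_range.mp hk
        unfold uIdx; split <;> omega
      rw [List.map_congr_left this]
      simp
    · apply List.map_congr_left
      intro t _
      show uIdx j (j + t) = j + 1 + t
      unfold uIdx; split <;> omega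
  have hrange : List.range n = List.range j ++ j :: List.map (fun t => j + 1 + t) (List.range d) := by
    have e2 : n = (j + 1) + d := by omega
    rw [e2, List.range_add, List.range_succ]
    simp [List.append_assoc]
  have hfalse : keepB m n j = false := by
    rw [← Bool.not_eq_true, keepB_iff]
    exact Bad_not_keep hB
  rw [hmap, hrange, List.filter_append, List.filter_append, List.filter_cons, hfalse]
  simp

theorem map_getD_range {r : List Int} {n : Nat} (hn : n ≤ r.length) :
    (List.range n).map (fun k => r.getD k 0) = r.take n := by
  apply List.ext_getElem
  · simp; omega
  · intro i h1 h2
    simp only [List.length_map, List.length_range] at h1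
    simp [List.getD_eq_getElem?_getD, List.getElem?_eq_getElem (show i < r.length by omega)]

theorem drop_eraseIdx (r : List Int) {j n : Nat} (hj : j < n) :
    (r.eraseIdx j).drop (n - 1) = r.drop n := by
  apply List.ext_getElem?
  intro i
  rw [List.getElem?_drop, List.getElem?_drop, List.getElem?_eraseIdx,
    if_neg (by omega : ¬ (n - 1 + i < j))]
  congr 1
  omega

theorem head_erase {m : List (List Int)} {j : Nat} (hm : m ≠ [])
    (hj : j < (m.headD []).length) :
    ((m.map (fun r => r.eraseIdx j)).headD []).length = (m.headD []).length - 1 := by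
  cases m with
  | nil => exact absurd rfl hm
  | cons r rest => simp at hj ⊢; simp [List.length_eraseIdx, hj]

theorem alt_delete {m : List (List Int)} {j : Nat} (hm : m ≠ [])
    (hj : j < (m.headD []).length) (hB : Bad m (m.headD []).length j) :
    sokrStrockVertikal_alt (m.map (fun r => r.eraseIdx j)) = sokrStrockVertikal_alt m := by
  unfold sokrStrockVertikal_alt
  rw [head_erase hm hj, List.map_map]
  apply List.map_congr_left
  intro r _
  show (((List.range ((m.headD []).length - 1)).filter
      (keepB (m.map (fun r => r.eraseIdx j)) ((m.headD []).length - 1))).map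
        (fun k => (r.eraseIdx j).getD k 0)) ++ (r.eraseIdx j).drop ((m.headD []).length - 1)
    = ((List.range (m.headD []).length).filter (keepB m (m.headD []).length)).map
        (fun k => r.getD k 0) ++ r.drop (m.headD []).length
  have hsel : ∀ (l : List Nat), l.map (fun k => (r.eraseIdx j).getD k 0)
      = (l.map (uIdx j)).map (fun k => r.getD k 0) := by
    intro l
    rw [List.map_map]
    apply List.map_congr_left
    intro k _
    exact getD_eraseIdx r j k
  rw [hsel, keep_map_u hj hB, drop_eraseIdx r hj]

theorem alt_id {m : List (List Int)} (hrect : ∀ r ∈ m, (m.headD []).length ≤ r.length)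
    (hnone : findPairA m (m.headD []).length (List.range (m.headD []).length) = none) :
    sokrStrockVertikal_alt m = m := by
  have hnop : ∀ i < (m.headD []).length, ∀ j' < (m.headD []).length, i ≠ j' → ¬ LEp m i j' := by
    intro i hi j' hj' hij'
    have h1 : findJA m i (List.range (m.headD []).length) = none :=
      findPairA_none hnone i (List.mem_range.mpr hi)
    exact findJA_none h1 j' (List.mem_range.mpr hj') hij'
  have hkeep : ∀ j' ∈ List.range (m.headD []).length, keepB m (m.headD []).length j' = true := by
    intro j' hj'
    have hj'n := List.mem_range.mp hj'
    rw [keepB_iff]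
    constructor
    · rintro ⟨i, hin, hij, hle, _⟩
      exact hnop i hin j' hj'n hij hle
    · rintro ⟨i, hij, hle, _⟩
      exact hnop i (by omega) j' hj'n (by omega) hle
  unfold sokrStrockVertikal_alt
  rw [List.filter_eq_self.mpr hkeep]
  conv_rhs => rw [← List.map_id m]
  apply List.map_congr_left
  intro r hr
  rw [map_getD_range (hrect r hr), List.take_append_drop]
  rfl

theorem main_eq : ∀ (N : Nat) (m : List (List Int)), (m.headD []).length ≤ N →
    Pre_sokrStrockVertikal m → sokrStrockVertikal m = sokrStrockVertikal_alt m := by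
  intro N
  induction N with
  | zero =>
    intro m hle hpre
    have h0 : (m.headD []).length = 0 := by omega
    rw [sokrStrockVertikal]
    split
    · next heq => exact (alt_id hpre.2 heq).symm
    · next j heq =>
      exfalso
      have := findPairA_mem heq
      omega
  | succ N ih =>
    intro m hle hpre
    rw [sokrStrockVertikal]
    split
    · next heq => exact (alt_id hpre.2 heq).symm
    · next j heq =>
      obtain ⟨hj, hB⟩ := findPair_bad heq
      have hm := hpre.1
      have hrect := hpre.2
      have hhead := head_erase hm hj
      have hpre' : Pre_sokrStrockVertikal (m.map (fun r => r.eraseIdx j)) := by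
        constructor
        · simp [hm]
        · intro r' hr'
          obtain ⟨r, hr, rfl⟩ := List.mem_map.mp hr'
          have := hrect r hr
          rw [hhead, List.length_eraseIdx]
          split_ifs <;> omega
      rw [ih _ (by omega) hpre', alt_delete hm hj hB]

-- ===== VERDICT (by name: the statement is the Claim_ definition above) =====
theorem sokrStrockVertikal_spec : Claim_equal_sokrStrockVertikal := by
  unfold Claim_equal_sokrStrockVertikal
  intro m _ hpre
  unfold Spec_sokrStrockVertikal
  exact main_eq _ m le_rfl hpre
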